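-- pv_equiv track=rewrite | github.com/mfurga-cs/asd | tydzien2/kolejka.py | dequeue
-- ===== SOURCE A (Python) =====
-- def dequeue(q):
--   if len(q) < 0:
--     return
--
--   s = []
--
--   while len(q) > 1:
--     s.append(q.pop())
--
--   res = q.pop()
--   while len(s) > 0:
--     q.append(s.pop())
--
--   return res
-- ===== SOURCE B (Python) =====
-- def dequeue(q):
--   return q.pop(0)
-- ===== Notes on version B (the rewrite author's own statement) =====
-- stated objective: simpler
-- what changed: B removes the front element directly with q.pop(0) instead of A's reverse-pop everything into a temporary stack, pop the last survivor, and push the stack back.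
import Mathlib
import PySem

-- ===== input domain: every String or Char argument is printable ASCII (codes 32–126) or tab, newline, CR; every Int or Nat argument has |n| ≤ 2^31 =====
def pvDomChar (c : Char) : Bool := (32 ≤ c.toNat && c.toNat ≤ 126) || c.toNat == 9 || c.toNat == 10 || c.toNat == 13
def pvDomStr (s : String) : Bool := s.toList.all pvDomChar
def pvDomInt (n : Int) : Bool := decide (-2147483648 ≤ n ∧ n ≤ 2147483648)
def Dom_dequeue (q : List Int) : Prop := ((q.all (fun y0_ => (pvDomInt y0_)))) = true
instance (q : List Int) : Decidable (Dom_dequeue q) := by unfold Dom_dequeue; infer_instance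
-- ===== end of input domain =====

-- B replaces A's pop-into-a-stack-and-restore dance by a single q.pop(0) (simpler; return value proved equal).
-- Both A and B mutate q in place to its tail; the theorems here are about the RETURN value only.

-- ===== PORT A =====
-- while len(q) > 1: s.append(q.pop())
def dequeueLoop1 (q s : List Int) : List Int × List Int :=
  if q.length > 1 then
    match h : PySem.List.pop? q (-1) with
    | some (x, q') => dequeueLoop1 q' (s ++ [x])
    | none => (q, s)          -- unreachable: q nonempty here
  else (q, s)
termination_by q.length
decreasing_by
  have := PySem.List.length_of_pop?_eq_some _ h
  simp at this ⊢
  omega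

-- while len(s) > 0: q.append(s.pop())
def dequeueLoop2 (q s : List Int) : List Int × List Int :=
  if s.length > 0 then
    match h : PySem.List.pop? s (-1) with
    | some (x, s') => dequeueLoop2 (q ++ [x]) s'
    | none => (q, s)          -- unreachable: s nonempty here
  else (q, s)
termination_by s.length
decreasing_by
  have := PySem.List.length_of_pop?_eq_some _ h
  simp at this ⊢
  omega

def dequeue (q : List Int) : Int :=
  match PySem.List.pop? (dequeueLoop1 q []).1 (-1) with
  | some (res, q2) =>
      let _qFinal := dequeueLoop2 q2 (dequeueLoop1 q []).2   -- rebuilds q (mutation; does not affect the return value)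
      res
  | none => 0                              -- IndexError in Python: excluded by Pre_dequeue

-- ===== PORT B =====
def dequeue_alt (q : List Int) : Int :=
  match PySem.List.pop? q 0 with
  | some (res, _) => res
  | none => 0                              -- IndexError in Python: excluded by Pre_dequeue

-- ===== PRECONDITION & SPEC =====
-- Pre_ excludes the empty list, on which both Pythons raise IndexError.
def Pre_dequeue (q : List Int) : Prop := q ≠ []
instance (q : List Int) : Decidable (Pre_dequeue q) := by unfold Pre_dequeue; infer_instance
def pvWitness_dequeue : List Int := [3, 1, 2]

def Spec_dequeue (q : List Int) (out : Int) : Prop := out = dequeue_alt q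
instance (q : List Int) (out : Int) : Decidable (Spec_dequeue q out) := by unfold Spec_dequeue; infer_instance

-- ===== CLAIM (what is proved, stated in full; the proofs are below) =====
def Claim_equal_dequeue : Prop := ∀ (q : List Int), Dom_dequeue q → Pre_dequeue q → Spec_dequeue q (dequeue q)

-- ===== LEMMAS AND PROOFS =====

-- A's first loop shrinks q from the back until one element remains: that element is q's head.
theorem dequeueLoop1_fst (n : Nat) : ∀ (q s : List Int), q.length ≤ n → ∀ (h : q ≠ []),
    (dequeueLoop1 q s).1 = [q.head h] := by
  induction n with
  | zero =>
    intro q s hn h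
    cases q with
    | nil => exact absurd rfl h
    | cons a t => simp at hn
  | succ m ih =>
    intro q s hn h
    unfold dequeueLoop1
    by_cases hlen : q.length > 1
    · simp only [hlen, if_pos]
      have hq : q.dropLast ++ [q.getLast h] = q := List.dropLast_append_getLast h
      have hpop : PySem.List.pop? q = some (q.getLast h, q.dropLast) := by
        conv_lhs => rw [← hq]
        exact PySem.List.pop?_last _ _
      rw [hpop]
      have hdne : q.dropLast ≠ [] := by
        intro hc
        have := congrArg List.length hc
        simp at this
        omega
      have hlt : q.dropLast.length ≤ m := by
        simp [List.length_dropLast]; omega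
      rw [ih q.dropLast _ hlt hdne]
      congr 1
      cases q with
      | nil => exact absurd rfl h
      | cons a t =>
        cases t with
        | nil => simp at hlen
        | cons b u => simp
    · simp only [hlen, if_neg, not_false_iff]
      cases q with
      | nil => exact absurd rfl h
      | cons a t =>
        cases t with
        | nil => rfl
        | cons b u => simp at hlen

theorem dequeue_spec : Claim_equal_dequeue := by
  intro q _ hq
  unfold Spec_dequeue dequeue dequeue_alt
  rw [dequeueLoop1_fst q.length q [] le_rfl hq]
  cases q with
  | nil => exact absurd rfl hq
  | cons a t =>
    have h1 : PySem.List.pop? ([a] : List Int) = some (a, []) := by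
      simpa using PySem.List.pop?_last ([] : List Int) a
    simp [h1, PySem.List.pop?_zero_cons]
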